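-- pv_equiv track=rewrite | github.com/tcprescott/sahasrahbot | alttprbot_discord/cogs/tourneyqualifier.py | build_multistream_links
-- ===== SOURCE A (Python) =====
-- def build_multistream_links(race):
--     twitchnames = []
--     for entrant in race['entrants']:
--         twitch = race['entrants'][entrant]['twitch']
--         if not twitch == "":
--             twitchnames.append(twitch)
--
--     chunks = [twitchnames[i * 4:(i + 1) * 4]
--               for i in range((len(twitchnames) + 4 - 1) // 4)]
--     multi = []
--     for chunk in chunks:
--         multi.append(
--             '<https://multistre.am/{streams}/layout12/>\n'.format(streams='/'.join(chunk)))
--     return multi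
-- ===== SOURCE B (Python) =====
-- def build_multistream_links(race):
--     multi = []
--     current = []
--     for entrant in race['entrants'].values():
--         twitch = entrant['twitch']
--         if twitch == "":
--             continue
--         current.append(twitch)
--         if len(current) == 4:
--             multi.append('<https://multistre.am/{}/layout12/>\n'.format('/'.join(current)))
--             current = []
--     if current:
--         multi.append('<https://multistre.am/{}/layout12/>\n'.format('/'.join(current)))
--     return multi
-- ===== Notes on version B (the rewrite author's own statement) =====
-- stated objective: alternative
-- what changed: B fuses A's three staged passes (filter the names, build index-arithmetic slices via a computed chunk count, then format each chunk) into ONE pass over entrants.values() that maintains a 4-slot buffer, emitting a formatted link whenever the buffer fills and flushing the partial buffer after the loop; no intermediate name list or chunk list is ever materialised.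
import Mathlib
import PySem

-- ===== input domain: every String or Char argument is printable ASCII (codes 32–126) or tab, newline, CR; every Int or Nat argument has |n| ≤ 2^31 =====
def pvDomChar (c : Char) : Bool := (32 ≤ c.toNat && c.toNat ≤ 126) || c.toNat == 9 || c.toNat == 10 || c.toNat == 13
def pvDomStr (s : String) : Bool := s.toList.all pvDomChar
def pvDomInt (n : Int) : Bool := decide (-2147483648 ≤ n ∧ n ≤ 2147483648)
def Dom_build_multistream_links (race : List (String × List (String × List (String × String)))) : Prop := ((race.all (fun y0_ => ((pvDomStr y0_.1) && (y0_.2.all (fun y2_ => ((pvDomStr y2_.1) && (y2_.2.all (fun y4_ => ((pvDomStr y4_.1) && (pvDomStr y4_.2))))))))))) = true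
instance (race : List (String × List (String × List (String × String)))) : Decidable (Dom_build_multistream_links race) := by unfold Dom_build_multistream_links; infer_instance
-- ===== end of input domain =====

-- B: one fused pass over entrants.values() with a 4-slot buffer (emit when full, flush the
-- remainder after the loop), instead of A's staged filter pass, index-arithmetic chunk list
-- comprehension and second formatting loop.


-- '<https://multistre.am/{}/layout12/>\n'.format('/'.join(...)) — this exact format line
-- appears verbatim in both Pythons, so both ports share it.
def pvFmt (chunk : List String) : String :=
  PySem.Str.join "" ["<https://multistre.am/", PySem.Str.join "/" chunk, "/layout12/>\n"]

-- ===== PORT A =====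
def build_multistream_links (race : List (String × List (String × List (String × String)))) : List String :=
  -- race['entrants'] (the KeyError when the key is absent is excluded by Pre_; default unreachable there)
  let entrants := PySem.Dict.mk ((PySem.Dict.mk race).getD "entrants" [])
  -- for entrant in race['entrants']: twitch = race['entrants'][entrant]['twitch'] (inlined);
  -- if not twitch == "": twitchnames.append(twitch)
  let twitchnames := entrants.keys.foldl (fun acc entrant =>
    if !((PySem.Dict.mk (entrants.getD entrant [])).getD "twitch" "" == "") then
      acc ++ [(PySem.Dict.mk (entrants.getD entrant [])).getD "twitch" ""]
    else acc) []
  -- chunks = [twitchnames[i * 4:(i + 1) * 4] for i in range((len(twitchnames) + 4 - 1) // 4)]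
  let chunks := (PySem.List.pyRange 0 (PySem.Int.floordiv (PySem.List.len twitchnames + 4 - 1) 4) 1).map
    (fun i => PySem.List.slice twitchnames (some (i * 4)) (some ((i + 1) * 4)))
  -- for chunk in chunks: multi.append(format(...))
  chunks.foldl (fun multi chunk => multi ++ [pvFmt chunk]) []

-- ===== PORT B =====
-- B-side helpers: the loop body's 'current.append(twitch); if len(current)==4: emit' and the
-- trailing 'if current:' flush, on the state (multi, current).
def pvStep (st : List String × List String) (twitch : String) : List String × List String :=
  let cur := st.2 ++ [twitch]
  if cur.length == 4 then (st.1 ++ [pvFmt cur], []) else (st.1, cur)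

def pvFlush (st : List String × List String) : List String :=
  if st.2 == [] then st.1 else st.1 ++ [pvFmt st.2]

def build_multistream_links_alt (race : List (String × List (String × List (String × String)))) : List String :=
  -- for entrant in race['entrants'].values(): twitch = entrant['twitch'];
  -- if twitch == "": continue; current.append(twitch); if len(current)==4: emit; … final flush
  pvFlush ((PySem.Dict.mk ((PySem.Dict.mk race).getD "entrants" [])).values.foldl
    (fun st entrant =>
      if (PySem.Dict.mk entrant).getD "twitch" "" == "" then st
      else pvStep st ((PySem.Dict.mk entrant).getD "twitch" "")) ([], []))

-- ===== PRECONDITION & SPEC =====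
-- Pre_ excludes inputs where the Python raises KeyError ('entrants' missing, or an entrant without a
-- 'twitch' key), and entrant association lists with duplicate keys: a Python dict cannot hold them
-- (a duplicated literal key collapses to the last value), so which value an assoc-list reading picks
-- there is an unspecified corner — A's key-iteration rereads the first match while B's values()
-- reads each entry.
def Pre_build_multistream_links (race : List (String × List (String × List (String × String)))) : Prop :=
  (PySem.Dict.mk race).contains "entrants" = true ∧
  (((PySem.Dict.mk race).getD "entrants" []).map Prod.fst).Nodup ∧
  ∀ p ∈ (PySem.Dict.mk race).getD "entrants" [], (PySem.Dict.mk p.2).contains "twitch" = true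
instance (race : List (String × List (String × List (String × String)))) : Decidable (Pre_build_multistream_links race) := by unfold Pre_build_multistream_links; infer_instance

def pvWitness_build_multistream_links : (List (String × List (String × List (String × String)))) :=
  [("entrants", [("alice", [("twitch", "alice_ttv")]),
                 ("bob", [("twitch", "")]),
                 ("carol", [("twitch", "carol99")])])]

def Spec_build_multistream_links (race : List (String × List (String × List (String × String)))) (out : List String) : Prop := out = build_multistream_links_alt race
instance (race : List (String × List (String × List (String × String)))) (out : List String) : Decidable (Spec_build_multistream_links race out) := by unfold Spec_build_multistream_links; infer_instance

-- ===== CLAIM (what is proved, stated in full; the proofs are below) =====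
def Claim_equal_build_multistream_links : Prop := ∀ (race : List (String × List (String × List (String × String)))), Dom_build_multistream_links race → Pre_build_multistream_links race → Spec_build_multistream_links race (build_multistream_links race)

-- ===== LEMMAS AND PROOFS =====

-- proof-only: the 4-chunking of a name list, by structural take/drop recursion
def pvChunks : List String → List String
  | [] => []
  | n :: rest => pvFmt ((n :: rest).take 4) :: pvChunks ((n :: rest).drop 4)
termination_by l => l.length
decreasing_by simp

theorem pvChunks_cons_eq (l : List String) (h : l ≠ []) :
    pvChunks l = pvFmt (l.take 4) :: pvChunks (l.drop 4) := by
  cases l with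
  | nil => exact absurd rfl h
  | cons n rest => rw [pvChunks]

-- A's append-if-nonempty loop over the keys produces the filtered-name flatMap.
theorem pv_names_loop (tw : String → String) (l : List String) (acc : List String) :
    l.foldl (fun a e => if !(tw e == "") then a ++ [tw e] else a) acc
      = acc ++ l.flatMap (fun e => if tw e != "" then [tw e] else []) := by
  induction l generalizing acc with
  | nil => simp
  | cons x xs ih =>
      rw [List.foldl_cons, ih]
      by_cases h : tw x = "" <;> simp [h]

-- B's skip-empty branch fuses the filter into the fold: it equals folding pvStep over the
-- filtered-name flatMap.
theorem pv_fuse_filter (tw : String → String) (l : List String)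
    (s : List String × List String) :
    l.foldl (fun st e => if tw e == "" then st else pvStep st (tw e)) s
      = (l.flatMap (fun e => if tw e != "" then [tw e] else [])).foldl pvStep s := by
  induction l generalizing s with
  | nil => rfl
  | cons x xs ih =>
      rw [List.foldl_cons, ih]
      by_cases h : tw x = "" <;> simp [h]

-- loop invariant: with a buffer shorter than 4, folding pvStep then flushing yields the
-- emitted links so far followed by the 4-chunking of buffer ++ remaining names.
theorem pv_fold_inv (ts : List String) : ∀ (m c : List String), c.length < 4 →
    pvFlush (ts.foldl pvStep (m, c)) = m ++ pvChunks (c ++ ts) := by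
  induction ts with
  | nil =>
      intro m c hc
      cases c with
      | nil => simp [pvFlush, pvChunks]
      | cons a l =>
          rw [List.foldl_nil, List.append_nil, pvChunks_cons_eq _ (by simp),
              List.take_of_length_le (by omega), List.drop_eq_nil_of_le (by simp at hc ⊢; omega)]
          simp [pvFlush, pvChunks]
  | cons n ts ih =>
      intro m c hc
      rw [List.foldl_cons]
      by_cases h4 : (c ++ [n]).length = 4
      · rw [show pvStep (m, c) n = (m ++ [pvFmt (c ++ [n])], []) from by
              simp [pvStep, h4],
            ih _ _ (by simp), List.nil_append,
            show c ++ n :: ts = (c ++ [n]) ++ ts from by simp,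
            pvChunks_cons_eq ((c ++ [n]) ++ ts) (by simp),
            List.take_append, List.drop_append, h4]
        simp [List.take_of_length_le (le_of_eq h4), List.drop_eq_nil_of_le (le_of_eq h4)]
      · rw [show pvStep (m, c) n = (m, c ++ [n]) from by
              simp [pvStep]; simp at h4; omega,
            ih _ _ (by simp at h4 ⊢; omega)]
        simp

-- A's chunk comprehension (count = ceil(n/4), Nat-indexed slices) formats to pvChunks.
theorem pv_chunks_eq_fuel (N : Nat) : ∀ ts : List String, ts.length ≤ N →
    (List.range ((ts.length + 3) / 4)).map (fun k => pvFmt ((ts.drop (4 * k)).take 4))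
      = pvChunks ts := by
  induction N with
  | zero =>
      intro ts h
      have hts : ts = [] := by cases ts <;> simp_all
      subst hts; simp [pvChunks]
  | succ N ih =>
      intro ts h
      cases ts with
      | nil => simp [pvChunks]
      | cons n rest =>
          rw [pvChunks_cons_eq _ (by simp)]
          have hcnt : ((n :: rest).length + 3) / 4 = (((n :: rest).drop 4).length + 3) / 4 + 1 := by
            simp only [List.length_drop, List.length_cons]; omega
          rw [hcnt, List.range_succ_eq_map, List.map_cons, List.map_map,
              ← ih ((n :: rest).drop 4) (by simp at h ⊢; omega)]
          refine congrArg₂ (· :: ·) ?_ ?_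
          · simp
          · apply List.map_congr_left
            intro k _
            simp only [Function.comp_apply, Nat.succ_eq_add_one, List.drop_drop]
            rw [show 4 * (k + 1) = 4 + 4 * k from by omega]

theorem pv_chunks_eq (ts : List String) :
    (List.range ((ts.length + 3) / 4)).map (fun k => pvFmt ((ts.drop (4 * k)).take 4))
      = pvChunks ts :=
  pv_chunks_eq_fuel ts.length ts le_rfl

-- ===== VERDICT (by name: the statement is the Claim_ definition above) =====
theorem build_multistream_links_spec : Claim_equal_build_multistream_links := by
  intro race _ hpre
  obtain ⟨-, hnd, -⟩ := hpre
  unfold Spec_build_multistream_links build_multistream_links build_multistream_links_alt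
  simp only []
  have hnd' : (PySem.Dict.mk ((PySem.Dict.mk race).getD "entrants" [])).keys.Nodup := by
    simpa [PySem.Dict.keys] using hnd
  -- B side: drop the skip-empty branch into a filtered-name list, over the keys
  rw [PySem.Dict.values_eq_map_keys (PySem.Dict.mk ((PySem.Dict.mk race).getD "entrants" [])) hnd' []]
  simp only [List.foldl_map]
  rw [pv_fuse_filter (fun e => (PySem.Dict.mk ((PySem.Dict.mk ((PySem.Dict.mk race).getD "entrants" [])).getD e [])).getD "twitch" "")]
  -- A side: the filter loop produces the same filtered-name list
  rw [pv_names_loop, List.nil_append,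
      PySem.List.foldl_append_singleton_eq_map, List.nil_append]
  generalize (PySem.Dict.mk ((PySem.Dict.mk race).getD "entrants" [])).keys.flatMap
      (fun e => if (PySem.Dict.mk ((PySem.Dict.mk ((PySem.Dict.mk race).getD "entrants" [])).getD e [])).getD "twitch" "" != ""
                then [(PySem.Dict.mk ((PySem.Dict.mk ((PySem.Dict.mk race).getD "entrants" [])).getD e [])).getD "twitch" ""]
                else []) = ts
  -- B side: the invariant turns the buffered fold into pvChunks
  rw [pv_fold_inv ts [] [] (by simp), List.nil_append, List.nil_append, ← pv_chunks_eq ts]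
  have hflo : PySem.Int.floordiv (PySem.List.len ts + 4 - 1) 4 = (((ts.length + 3) / 4 : Nat) : Int) := by
    rw [PySem.List.len_eq]
    have h3 : (ts.length : Int) + 4 - 1 = ((ts.length + 3 : Nat) : Int) := by push_cast; ring
    rw [h3]
    exact_mod_cast PySem.Int.floordiv_natCast (ts.length + 3) 4
  rw [hflo, PySem.List.pyRange_zero_natCast, List.map_map]
  apply List.map_congr_left
  intro k hk
  simp only [Function.comp_apply]
  congr 1
  have h4 : ((k : Int) * 4) = (((4 * k : Nat) : Int)) := by push_cast; ring
  have h4' : ((k : Int) + 1) * 4 = (((4 * k : Nat) : Int) + ((4 : Nat) : Int)) := by push_cast; ring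
  rw [h4, h4', PySem.List.slice_natCast_add]
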